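-- pv_equiv track=rewrite | github.com/oraby8/taxonomy_project | src/utilites/utility.py | not_in_chunk
-- ===== SOURCE A (Python) =====
-- def not_in_chunk(list_of_tokens):
--     final_tokens = []
--     list_of_tokens = sorted(list_of_tokens, key=len, reverse=False)
--     for i, j in enumerate(list_of_tokens):
--         flag = False
--         for m in list_of_tokens[i + 1:]:
--             if j in m:
--                 flag = True
--                 break
--         if not flag:
--             final_tokens.append(j)
--     return final_tokens
-- ===== SOURCE B (Python) =====
-- def not_in_chunk(list_of_tokens):
--     kept = []
--     for j in reversed(sorted(list_of_tokens, key=len)):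
--         # by transitivity of "is a substring of", checking against the kept
--         # survivors is the same as checking against all later tokens
--         if not any(j in k for k in kept):
--             kept.insert(0, j)
--     return kept
-- ===== Notes on version B (the rewrite author's own statement) =====
-- stated objective: alternative
-- what changed: B scans the length-sorted list back-to-front and tests each token only against the already-kept survivors (correct by transitivity of the substring relation), instead of A's forward scan testing each token against the whole remaining suffix.
import Mathlib
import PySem

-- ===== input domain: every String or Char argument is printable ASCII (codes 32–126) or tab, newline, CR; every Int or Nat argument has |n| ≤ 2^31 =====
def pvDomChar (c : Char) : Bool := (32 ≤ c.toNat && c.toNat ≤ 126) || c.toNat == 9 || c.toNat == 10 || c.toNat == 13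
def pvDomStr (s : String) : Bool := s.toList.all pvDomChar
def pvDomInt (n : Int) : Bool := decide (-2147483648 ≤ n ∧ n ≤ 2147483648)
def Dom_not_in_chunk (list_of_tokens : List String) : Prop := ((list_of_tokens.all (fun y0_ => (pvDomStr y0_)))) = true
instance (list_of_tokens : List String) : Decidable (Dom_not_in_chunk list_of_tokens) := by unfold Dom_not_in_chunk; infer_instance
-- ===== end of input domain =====

-- B scans the length-sorted list back-to-front, testing each token only against the
-- already-kept survivors (valid by transitivity of substring), instead of A's forward
-- scan over the whole remaining suffix; objective: alternative algorithm, same result.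


-- ===== PORT A =====
-- for i, j in enumerate(L): flag = any(j in m for m in L[i+1:]) (with early break); append j if not flag
def not_in_chunk (list_of_tokens : List String) : List String :=
  let L := PySem.List.sorted list_of_tokens (fun s => PySem.Str.len s) false
  (PySem.List.enumerate L 0).foldl
    (fun final_tokens ij =>
      let flag := (PySem.List.slice L (some (ij.1 + 1)) none).any (fun m => PySem.Str.isIn ij.2 m)
      if !flag then final_tokens ++ [ij.2] else final_tokens)
    []

-- ===== PORT B =====
-- for j in reversed(sorted(..., key=len)): if not any(j in k for k in kept): kept.insert(0, j)
def not_in_chunk_alt (list_of_tokens : List String) : List String :=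
  (PySem.List.sorted list_of_tokens (fun s => PySem.Str.len s) false).reverse.foldl
    (fun kept j => if kept.any (fun k => PySem.Str.isIn j k) then kept else j :: kept)
    []

-- ===== PRECONDITION & SPEC =====
def Spec_not_in_chunk (list_of_tokens : List String) (out : List String) : Prop := out = not_in_chunk_alt list_of_tokens
instance (list_of_tokens : List String) (out : List String) : Decidable (Spec_not_in_chunk list_of_tokens out) := by unfold Spec_not_in_chunk; infer_instance

-- ===== CLAIM (what is proved, stated in full; the proofs are below) =====
def Claim_equal_not_in_chunk : Prop := ∀ (list_of_tokens : List String), Dom_not_in_chunk list_of_tokens → Spec_not_in_chunk list_of_tokens (not_in_chunk list_of_tokens)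

-- ===== LEMMAS AND PROOFS =====

-- A's selection written as structural recursion on the sorted list
def filtA : List String → List String
  | [] => []
  | j :: rest => if rest.any (fun m => PySem.Str.isIn j m) then filtA rest else j :: filtA rest

-- B's accumulator as a foldr over the sorted list
def filtB (L : List String) : List String :=
  L.foldr (fun j kept => if kept.any (fun k => PySem.Str.isIn j k) then kept else j :: kept) []

lemma filtB_cons (j : String) (r : List String) :
    filtB (j :: r) = if (filtB r).any (fun k => PySem.Str.isIn j k) then filtB r else j :: filtB r := rfl

lemma mem_of_mem_filtB {x : String} {L : List String} (h : x ∈ filtB L) : x ∈ L := by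
  induction L with
  | nil => simp [filtB] at h
  | cons j r ih =>
    rw [filtB_cons] at h
    split at h
    · exact List.mem_cons_of_mem _ (ih h)
    · rcases List.mem_cons.mp h with h | h
      · simp [h]
      · exact List.mem_cons_of_mem _ (ih h)

-- every element of L is a substring of some survivor in filtB L
lemma filtB_dominates {m : String} {L : List String} (h : m ∈ L) :
    ∃ k ∈ filtB L, m.toList <:+: k.toList := by
  induction L with
  | nil => simp at h
  | cons j r ih =>
    rw [filtB_cons]
    rcases List.mem_cons.mp h with h | h
    · subst h
      by_cases hany : ((filtB r).any (fun k => PySem.Str.isIn m k)) = true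
      · rw [if_pos hany]
        obtain ⟨k, hk, hin⟩ := List.any_eq_true.mp hany
        exact ⟨k, hk, (PySem.Str.isIn_iff_infix _ _).mp hin⟩
      · rw [if_neg hany]
        exact ⟨m, List.mem_cons_self, List.infix_refl _⟩
    · obtain ⟨k, hk, hinf⟩ := ih h
      split
      · exact ⟨k, hk, hinf⟩
      · exact ⟨k, List.mem_cons_of_mem _ hk, hinf⟩

lemma any_filtB_eq (j : String) (r : List String) :
    (filtB r).any (fun k => PySem.Str.isIn j k) = r.any (fun m => PySem.Str.isIn j m) := by
  rw [Bool.eq_iff_iff, List.any_eq_true, List.any_eq_true]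
  constructor
  · rintro ⟨k, hk, hin⟩
    exact ⟨k, mem_of_mem_filtB hk, hin⟩
  · rintro ⟨m, hm, hin⟩
    obtain ⟨k, hk, hinf⟩ := filtB_dominates hm
    exact ⟨k, hk, (PySem.Str.isIn_iff_infix _ _).mpr
      (((PySem.Str.isIn_iff_infix _ _).mp hin).trans hinf)⟩

lemma filtB_eq_filtA (L : List String) : filtB L = filtA L := by
  induction L with
  | nil => rfl
  | cons j r ih => rw [filtB_cons, any_filtB_eq, filtA, ih]

-- A's fold over enumerate, on the suffix starting at n, produces acc ++ filtA (suffix)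
lemma foldA_suffix (L : List String) (n : Nat) (acc : List String) :
    (PySem.List.enumerate (L.drop n) (n : Int)).foldl
      (fun final_tokens ij =>
        let flag := (PySem.List.slice L (some (ij.1 + 1)) none).any (fun m => PySem.Str.isIn ij.2 m)
        if !flag then final_tokens ++ [ij.2] else final_tokens)
      acc = acc ++ filtA (L.drop n) := by
  by_cases hn : n < L.length
  · have hdrop : L.drop n = L[n] :: L.drop (n + 1) := List.drop_eq_getElem_cons hn
    rw [hdrop, PySem.List.enumerate_cons, List.foldl_cons]
    have hslice : PySem.List.slice L (some ((n : Int) + 1)) none = L.drop (n + 1) := by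
      have : ((n : Int) + 1) = ((n + 1 : Nat) : Int) := by push_cast; ring
      rw [this, PySem.List.slice_from_natCast]
    have ih := foldA_suffix L (n + 1)
    simp only [hslice, filtA]
    split
    · rename_i h
      rw [if_neg (by simpa using h)]
      have := ih (acc ++ [L[n]])
      simp only [Nat.cast_add, Nat.cast_one] at this
      rw [this, List.append_assoc]
      rfl
    · rename_i h
      rw [if_pos (by simpa using h)]
      have := ih acc
      simp only [Nat.cast_add, Nat.cast_one] at this
      rw [this]
  · rw [List.drop_eq_nil_of_le (by omega)]
    simp [PySem.List.enumerate, filtA]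
termination_by L.length - n

-- ===== VERDICT (by name: the statement is the Claim_ definition above) =====
theorem not_in_chunk_spec : Claim_equal_not_in_chunk := by
  intro xs _
  unfold Spec_not_in_chunk not_in_chunk not_in_chunk_alt
  rw [List.foldl_reverse]
  have hA := foldA_suffix (PySem.List.sorted xs (fun s => PySem.Str.len s) false) 0 []
  simp only [List.drop_zero, Nat.cast_zero, List.nil_append] at hA
  rw [hA, ← filtB_eq_filtA]
  rfl
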